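-- pv_equiv track=rewrite | github.com/DeanInMichigan/HomeSite | scripts/convert_recipes.py | extract_intro
-- ===== SOURCE A (Python) =====
-- def extract_intro(markdown: str) -> str:
--     """Extract the intro text before the first ## heading."""
--     lines = markdown.split('\n')
--     intro_lines = []
--     for line in lines:
--         if line.startswith('## ') or line.startswith('# '):
--             break
--         intro_lines.append(line)
--     return '\n'.join(intro_lines).strip()
-- ===== SOURCE B (Python) =====
-- import re
--
-- _HEADING_RE = re.compile(r'^#{1,2} ', re.MULTILINE)
--
-- def extract_intro(markdown: str) -> str:
--     """Extract the intro text before the first ## heading."""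
--     m = _HEADING_RE.search(markdown)
--     if m:
--         return markdown[:m.start()].strip()
--     return markdown.strip()
-- ===== Notes on version B (the rewrite author's own statement) =====
-- stated objective: idiomatic
-- what changed: Replaces the split-into-lines / accumulate-until-heading loop with a single multiline regex search for the first heading line start and one slice of the raw string.
import Mathlib
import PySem

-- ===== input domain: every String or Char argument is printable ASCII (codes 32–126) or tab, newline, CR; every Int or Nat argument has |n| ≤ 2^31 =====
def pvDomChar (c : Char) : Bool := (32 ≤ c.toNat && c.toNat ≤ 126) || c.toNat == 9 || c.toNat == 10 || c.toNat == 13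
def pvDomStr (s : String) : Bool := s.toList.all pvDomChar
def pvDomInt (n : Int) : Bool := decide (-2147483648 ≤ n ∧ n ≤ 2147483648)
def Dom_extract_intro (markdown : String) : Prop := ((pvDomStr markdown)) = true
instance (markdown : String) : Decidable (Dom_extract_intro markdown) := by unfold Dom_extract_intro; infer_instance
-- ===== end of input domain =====

-- B replaces A's split-into-lines/accumulate-until-heading loop with a single scan for the
-- first heading line start ('# ' or '## ' at a line start, re.search(r'^#{1,2} ', md, re.M))
-- and one slice of the raw string (idiomatic; same return value, proved below).

-- ===== PORT A =====
-- line.startswith('## ') or line.startswith('# ')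
def headingLine (l : List Char) : Bool :=
  PySem.Chars.startswith l ['#', '#', ' '] || PySem.Chars.startswith l ['#', ' ']

-- the for-loop with break: accumulate lines until a heading line is met
def introLoop (acc : List (List Char)) (lines : List (List Char)) : List (List Char) :=
  match lines with
  | [] => acc
  | l :: rest => if headingLine l then acc else introLoop (acc ++ [l]) rest

def extract_intro (markdown : String) : String :=
  let lines := PySem.Chars.splitOn markdown.toList ['\n']   -- markdown.split('\n')
  String.ofList (PySem.Chars.strip (PySem.Chars.join ['\n'] (introLoop [] lines)))

-- ===== PORT B =====
-- what the regex '#{1,2} ' matches at one position: '## ' or '# '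
def isHead (cs : List Char) : Bool :=
  PySem.Chars.startswith cs ['#', '#', ' '] || PySem.Chars.startswith cs ['#', ' ']

-- re.search(r'^#{1,2} ', markdown, re.MULTILINE): index of the leftmost match; '^' anchors
-- at position 0 and right after every '\n' (tracked by the atStart flag). Exact for this
-- pattern: the regex engine scans positions left to right and matches only at line starts.
def scanHead (atStart : Bool) (cs : List Char) (i : Nat) : Option Nat :=
  match cs with
  | [] => none
  | c :: rest =>
      if atStart && isHead (c :: rest) then some i
      else scanHead (c == '\n') rest (i + 1)

def extract_intro_alt (markdown : String) : String :=
  let cs := markdown.toList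
  match scanHead true cs 0 with
  | some j => String.ofList (PySem.Chars.strip (cs.take j))  -- markdown[:m.start()].strip(), 0 ≤ j
  | none => String.ofList (PySem.Chars.strip cs)             -- markdown.strip()

-- ===== PRECONDITION & SPEC =====
def Spec_extract_intro (markdown : String) (out : String) : Prop := out = extract_intro_alt markdown
instance (markdown : String) (out : String) : Decidable (Spec_extract_intro markdown out) := by unfold Spec_extract_intro; infer_instance

-- ===== CLAIM (what is proved, stated in full; the proofs are below) =====
def Claim_equal_extract_intro : Prop := ∀ (markdown : String), Dom_extract_intro markdown → Spec_extract_intro markdown (extract_intro markdown)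

-- ===== LEMMAS AND PROOFS =====

-- ## rstrip facts
lemma rstrip_eq_nil_iff (t : List Char) :
    PySem.Chars.rstrip t = [] ↔ ∀ a ∈ t, PySem.Chars.isspace a = true := by
  simp [PySem.Chars.rstrip, List.dropWhile_eq_nil_iff]

lemma rstrip_append (p q : List Char) :
    PySem.Chars.rstrip (p ++ q)
      = if PySem.Chars.rstrip q = [] then PySem.Chars.rstrip p else p ++ PySem.Chars.rstrip q := by
  simp only [PySem.Chars.rstrip, List.reverse_append]
  rcases h : List.dropWhile PySem.Chars.isspace q.reverse with _ | ⟨c, t⟩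
  · simp [List.dropWhile_append, h]
  · have hne : ¬ (List.dropWhile PySem.Chars.isspace q.reverse = []) := by simp [h]
    simp [List.dropWhile_append, h]

lemma lstrip_rstrip_comm (s : List Char) :
    PySem.Chars.lstrip (PySem.Chars.rstrip s) = PySem.Chars.rstrip (PySem.Chars.lstrip s) := by
  induction s with
  | nil => rfl
  | cons c t ih =>
    have h1 : PySem.Chars.rstrip (c :: t)
        = if PySem.Chars.rstrip t = [] then PySem.Chars.rstrip [c] else c :: PySem.Chars.rstrip t := by
      simpa using rstrip_append [c] t
    by_cases hc : PySem.Chars.isspace c = true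
    · have hlc : PySem.Chars.lstrip (c :: t) = PySem.Chars.lstrip t := by
        simp [PySem.Chars.lstrip, hc]
      have hrc : PySem.Chars.rstrip [c] = [] := by simp [PySem.Chars.rstrip, hc]
      by_cases h0 : PySem.Chars.rstrip t = []
      · have hall : ∀ a ∈ t, PySem.Chars.isspace a = true := (rstrip_eq_nil_iff t).1 h0
        have hl : PySem.Chars.lstrip t = [] := by
          simp [PySem.Chars.lstrip, List.dropWhile_eq_nil_iff]; exact fun a ha => hall a ha
        rw [hlc, h1, if_pos h0, hrc, hl]
        rfl
      · rw [hlc, h1, if_neg h0]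
        have : PySem.Chars.lstrip (c :: PySem.Chars.rstrip t) = PySem.Chars.lstrip (PySem.Chars.rstrip t) := by
          simp [PySem.Chars.lstrip, hc]
        rw [this, ih]
    · have hlc : PySem.Chars.lstrip (c :: t) = c :: t := by
        simp [PySem.Chars.lstrip, hc]
      have hlid : ∀ x : List Char, PySem.Chars.lstrip (c :: x) = c :: x := by
        intro x; simp [PySem.Chars.lstrip, hc]
      rw [hlc, h1]
      split_ifs with h0
      · rw [show PySem.Chars.rstrip [c] = [c] from by simp [PySem.Chars.rstrip, hc], hlid]
      · rw [hlid]

lemma strip_eq_of_rstrip_eq {x y : List Char} (h : PySem.Chars.rstrip x = PySem.Chars.rstrip y) :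
    PySem.Chars.strip x = PySem.Chars.strip y := by
  unfold PySem.Chars.strip
  rw [← lstrip_rstrip_comm, ← lstrip_rstrip_comm, h]

-- ## splitOn facts (single-char separator '\n')
lemma splitOn_go_no_nl : ∀ (l : List Char) (fuel : Nat) (cur : List Char) (acc : List (List Char)),
    '\n' ∉ l →
    PySem.Chars.splitOn.go ['\n'] fuel l cur acc = ((cur.reverse ++ l) :: acc).reverse := by
  intro l
  induction l with
  | nil =>
    intro fuel cur acc _
    cases fuel <;> rw [PySem.Chars.splitOn.go.eq_def] <;> simp
  | cons c t ih =>
    intro fuel cur acc h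
    have hc : c ≠ '\n' := by intro e; exact h (e ▸ List.mem_cons_self ..)
    have ht : '\n' ∉ t := fun m => h (List.mem_cons_of_mem _ m)
    cases fuel with
    | zero => simp [PySem.Chars.splitOn.go]
    | succ f =>
      have hpre : List.isPrefixOf ['\n'] (c :: t) = false := by
        simp [List.isPrefixOf]; exact fun e => absurd e.symm hc
      rw [PySem.Chars.splitOn.go.eq_def]
      simp only [hpre, Bool.false_eq_true, if_false]
      rw [ih f (c :: cur) acc ht]
      simp

lemma splitOn_go_skip : ∀ (l : List Char) (fuel : Nat) (rest cur : List Char) (acc : List (List Char)),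
    '\n' ∉ l → l.length < fuel →
    PySem.Chars.splitOn.go ['\n'] fuel (l ++ '\n' :: rest) cur acc
      = PySem.Chars.splitOn.go ['\n'] (fuel - (l.length + 1)) rest [] ((cur.reverse ++ l) :: acc) := by
  intro l
  induction l with
  | nil =>
    intro fuel rest cur acc _ hf
    cases fuel with
    | zero => omega
    | succ f =>
      rw [PySem.Chars.splitOn.go.eq_def]
      have hpre : List.isPrefixOf ['\n'] ('\n' :: rest) = true := by simp [List.isPrefixOf]
      simp [hpre]
  | cons c t ih =>
    intro fuel rest cur acc h hf
    have hc : c ≠ '\n' := by intro e; exact h (e ▸ List.mem_cons_self ..)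
    have ht : '\n' ∉ t := fun m => h (List.mem_cons_of_mem _ m)
    cases fuel with
    | zero => omega
    | succ f =>
      have hpre : List.isPrefixOf ['\n'] (c :: (t ++ '\n' :: rest)) = false := by
        simp [List.isPrefixOf]; exact fun e => absurd e.symm hc
      rw [List.cons_append, PySem.Chars.splitOn.go.eq_def]
      simp only [hpre, Bool.false_eq_true, if_false, ite_false]
      rw [ih f rest (c :: cur) acc ht (by simp only [List.length_cons] at hf; omega)]
      have h2 : f - (t.length + 1) = f + 1 - ((c :: t).length + 1) := by simp only [List.length_cons]; omega
      rw [h2]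
      simp

lemma splitOn_go_acc : ∀ (fuel : Nat) (l cur : List Char) (acc : List (List Char)),
    PySem.Chars.splitOn.go ['\n'] fuel l cur acc
      = acc.reverse ++ PySem.Chars.splitOn.go ['\n'] fuel l cur [] := by
  intro fuel
  induction fuel with
  | zero => intro l cur acc; simp [PySem.Chars.splitOn.go]
  | succ f ih =>
    intro l cur acc
    cases l with
    | nil => simp [PySem.Chars.splitOn.go]
    | cons c rest =>
      rw [PySem.Chars.splitOn.go.eq_def, PySem.Chars.splitOn.go.eq_def]
      by_cases hpre : List.isPrefixOf ['\n'] (c :: rest) = true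
      · simp only [hpre, if_true, ite_true]
        rw [ih _ _ (cur.reverse :: acc), ih _ _ [cur.reverse]]
        simp
      · simp only [hpre, if_false, Bool.false_eq_true, ite_false]
        rw [ih rest (c :: cur) acc]

lemma splitOn_no_nl (cs : List Char) (h : '\n' ∉ cs) :
    PySem.Chars.splitOn cs ['\n'] = [cs] := by
  unfold PySem.Chars.splitOn
  rw [splitOn_go_no_nl cs _ [] [] h]
  simp

lemma splitOn_cons_nl (l rest : List Char) (h : '\n' ∉ l) :
    PySem.Chars.splitOn (l ++ '\n' :: rest) ['\n'] = l :: PySem.Chars.splitOn rest ['\n'] := by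
  unfold PySem.Chars.splitOn
  rw [splitOn_go_skip l _ rest [] [] h (by simp only [List.length_append, List.length_cons]; omega)]
  rw [splitOn_go_acc]
  have : (l ++ '\n' :: rest).length + 1 - (l.length + 1) = rest.length + 1 := by
    simp only [List.length_append, List.length_cons]; omega
  rw [this]
  simp

-- ## scanHead facts
lemma scan_shift (cs : List Char) : ∀ (b : Bool) (i k : Nat),
    scanHead b cs (i + k) = (scanHead b cs k).map (· + i) := by
  induction cs with
  | nil => intro b i k; rfl
  | cons c rest ih =>
    intro b i k
    rw [scanHead, scanHead]
    by_cases hb : (b && isHead (c :: rest)) = true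
    · simp [hb, Nat.add_comm]
    · simp only [hb, Bool.false_eq_true, if_false]
      have : i + k + 1 = i + (k + 1) := by omega
      rw [this, ih]

lemma scan_false_no_nl (cs : List Char) (h : '\n' ∉ cs) : ∀ i, scanHead false cs i = none := by
  induction cs with
  | nil => intro i; rfl
  | cons c rest ih =>
    intro i
    have hc : c ≠ '\n' := by intro e; exact h (e ▸ List.mem_cons_self ..)
    rw [scanHead]
    simp only [Bool.false_and, Bool.false_eq_true, if_false]
    have : (c == '\n') = false := by simp [hc]
    rw [this]
    exact ih (fun m => h (List.mem_cons_of_mem _ m)) _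

lemma scan_false_skip (l : List Char) (h : '\n' ∉ l) : ∀ (rest : List Char) (i : Nat),
    scanHead false (l ++ '\n' :: rest) i = scanHead true rest (i + l.length + 1) := by
  induction l with
  | nil => intro rest i; rw [List.nil_append, scanHead]; simp
  | cons c t ih =>
    intro rest i
    have hc : c ≠ '\n' := by intro e; exact h (e ▸ List.mem_cons_self ..)
    rw [List.cons_append, scanHead]
    simp only [Bool.false_and, Bool.false_eq_true, if_false]
    have : (c == '\n') = false := by simp [hc]
    rw [this, ih (fun m => h (List.mem_cons_of_mem _ m)) rest (i + 1)]
    congr 1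
    simp; omega

-- heading test does not see past the first newline
lemma isHead_append_nl (l rest : List Char) :
    isHead (l ++ '\n' :: rest) = headingLine l := by
  match l with
  | [] => simp [isHead, headingLine, PySem.Chars.startswith, List.isPrefixOf]
  | [a] => simp [isHead, headingLine, PySem.Chars.startswith, List.isPrefixOf]
  | [a, b] => simp [isHead, headingLine, PySem.Chars.startswith, List.isPrefixOf]
  | a :: b :: c :: t => simp [isHead, headingLine, PySem.Chars.startswith, List.isPrefixOf]

-- scanning from a line start: skip a non-heading first line
lemma scan_skip (l rest : List Char) (h : '\n' ∉ l) (hh : isHead (l ++ '\n' :: rest) = false) :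
    scanHead true (l ++ '\n' :: rest) 0 = scanHead true rest (l.length + 1) := by
  cases l with
  | nil =>
    rw [List.nil_append] at hh
    rw [List.nil_append, scanHead]
    simp [hh]
  | cons c t =>
    have hc : c ≠ '\n' := by intro e; exact h (e ▸ List.mem_cons_self ..)
    rw [List.cons_append, scanHead]
    rw [show ((c :: (t ++ '\n' :: rest))) = ((c :: t) ++ '\n' :: rest) from rfl] at *
    simp only [Bool.true_and, hh, Bool.false_eq_true, if_false]
    have : (c == '\n') = false := by simp [hc]
    rw [this, scan_false_skip t (fun m => h (List.mem_cons_of_mem _ m)) rest 1]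
    congr 1
    simp; omega

-- ## introLoop facts
lemma introLoop_acc (lines : List (List Char)) : ∀ acc,
    introLoop acc lines = acc ++ introLoop [] lines := by
  induction lines with
  | nil => intro acc; simp [introLoop]
  | cons l rest ih =>
    intro acc
    rw [introLoop, introLoop]
    by_cases hl : headingLine l = true
    · simp [hl]
    · simp only [hl, Bool.false_eq_true, if_false]
      rw [ih (acc ++ [l]), ih ([] ++ [l])]
      simp

-- ## gluing lemmas at the rstrip level
lemma rstrip_glue (l X Y : List Char) (h : PySem.Chars.rstrip X = PySem.Chars.rstrip Y) :
    PySem.Chars.rstrip (l ++ '\n' :: X) = PySem.Chars.rstrip (l ++ '\n' :: Y) := by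
  have hx : PySem.Chars.rstrip ('\n' :: X) = PySem.Chars.rstrip ('\n' :: Y) := by
    have h1 := rstrip_append ['\n'] X
    have h2 := rstrip_append ['\n'] Y
    simp only [List.singleton_append] at h1 h2
    rw [h1, h2, h]
  rw [show l ++ '\n' :: X = l ++ ('\n' :: X) from rfl,
      show l ++ '\n' :: Y = l ++ ('\n' :: Y) from rfl,
      rstrip_append, rstrip_append, hx]

lemma rstrip_join_cons (l : List Char) (T : List (List Char)) :
    PySem.Chars.rstrip (PySem.Chars.join ['\n'] (l :: T))
      = PySem.Chars.rstrip (l ++ '\n' :: PySem.Chars.join ['\n'] T) := by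
  cases T with
  | nil =>
    rw [PySem.Chars.join_singleton, PySem.Chars.join_nil]
    rw [show l ++ '\n' :: ([] : List Char) = l ++ ['\n'] from rfl, rstrip_append]
    have : PySem.Chars.rstrip ['\n'] = [] := by decide
    simp [this]
  | cons t0 T' =>
    rw [PySem.Chars.join_cons_cons]
    simp

lemma scan_true_none (cs : List Char) (hh : isHead cs = false) (hnl : '\n' ∉ cs) :
    scanHead true cs 0 = none := by
  cases cs with
  | nil => rfl
  | cons c t =>
    rw [scanHead]
    simp only [Bool.true_and, hh, Bool.false_eq_true, if_false]
    have hc : c ≠ '\n' := by intro e; exact hnl (e ▸ List.mem_cons_self ..)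
    have : (c == '\n') = false := by simp [hc]
    rw [this]
    exact scan_false_no_nl t (fun m => hnl (List.mem_cons_of_mem _ m)) 1

lemma isHead_nil : isHead [] = false := rfl

-- ## the main equivalence at the rstrip level
lemma main_rstrip : ∀ (n : Nat) (cs : List Char), cs.length ≤ n →
    PySem.Chars.rstrip (match scanHead true cs 0 with | some j => cs.take j | none => cs)
      = PySem.Chars.rstrip (PySem.Chars.join ['\n'] (introLoop [] (PySem.Chars.splitOn cs ['\n']))) := by
  intro n
  induction n with
  | zero =>
    intro cs hlen
    have : cs = [] := List.length_eq_zero_iff.mp (Nat.le_zero.mp hlen)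
    subst this
    decide
  | succ n ih =>
    intro cs hlen
    by_cases hh : isHead cs = true
    · -- heading at position 0: B takes the empty prefix, A's loop breaks immediately
      obtain ⟨c, t, rfl⟩ : ∃ c t, cs = c :: t := by
        cases cs with
        | nil => exact absurd hh (by simp [isHead_nil])
        | cons c t => exact ⟨c, t, rfl⟩
      have hscan : scanHead true (c :: t) 0 = some 0 := by
        rw [scanHead]; simp [hh]
      rw [hscan]
      simp only [List.take_zero]
      by_cases hmem : '\n' ∈ c :: t
      · -- decompose at the first newline
        obtain ⟨l, rest, hcs, hnl⟩ : ∃ l rest, c :: t = l ++ '\n' :: rest ∧ '\n' ∉ l := by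
          refine ⟨(c :: t).takeWhile (fun x => x != '\n'), ((c :: t).dropWhile (fun x => x != '\n')).tail, ?_, ?_⟩
          · have hd : (c :: t).dropWhile (fun x => x != '\n') ≠ [] := by
              intro e
              rw [List.dropWhile_eq_nil_iff] at e
              have := e '\n' hmem
              simp at this
            have hhead : ((c :: t).dropWhile (fun x => x != '\n')).head hd = '\n' := by
              have := List.head_dropWhile_not (p := fun x => x != '\n') hd
              simpa using this
            conv_lhs => rw [← List.takeWhile_append_dropWhile (p := fun x => x != '\n') (l := c :: t)]
            congr 1
            have hct := List.cons_head_tail hd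
            rw [hhead] at hct
            exact hct.symm
          · intro hm
            have := List.mem_takeWhile_imp hm
            simp at this
        rw [hcs]
        rw [splitOn_cons_nl l _ hnl]
        have hl : headingLine l = true := by rw [← isHead_append_nl l _, ← hcs]; exact hh
        rw [introLoop]
        simp [hl, PySem.Chars.join_nil]
      · rw [splitOn_no_nl _ hmem]
        have hl : headingLine (c :: t) = true := hh
        rw [introLoop]
        simp [hl, PySem.Chars.join_nil]
    · replace hh : isHead cs = false := by simpa using hh
      by_cases hmem : '\n' ∈ cs
      · -- cs = l ++ '\n' :: rest, first line l is not a heading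
        obtain ⟨l, rest, hcs, hnl⟩ : ∃ l rest, cs = l ++ '\n' :: rest ∧ '\n' ∉ l := by
          refine ⟨cs.takeWhile (fun x => x != '\n'), (cs.dropWhile (fun x => x != '\n')).tail, ?_, ?_⟩
          · have hd : cs.dropWhile (fun x => x != '\n') ≠ [] := by
              intro e
              rw [List.dropWhile_eq_nil_iff] at e
              have := e '\n' hmem
              simp at this
            have hhead : (cs.dropWhile (fun x => x != '\n')).head hd = '\n' := by
              have := List.head_dropWhile_not (p := fun x => x != '\n') hd
              simpa using this
            conv_lhs => rw [← List.takeWhile_append_dropWhile (p := fun x => x != '\n') (l := cs)]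
            congr 1
            have hct := List.cons_head_tail hd
            rw [hhead] at hct
            exact hct.symm
          · intro hm
            have := List.mem_takeWhile_imp hm
            simp at this
        subst hcs
        have hrest : rest.length ≤ n := by
          simp only [List.length_append, List.length_cons] at hlen; omega
        have hscan : scanHead true (l ++ '\n' :: rest) 0
            = (scanHead true rest 0).map (· + (l.length + 1)) := by
          rw [scan_skip l rest hnl hh]
          have := scan_shift rest true (l.length + 1) 0
          simpa using this
        have hl : headingLine l = false := by rw [← isHead_append_nl l rest]; exact hh
        rw [splitOn_cons_nl l rest hnl, introLoop]
        simp only [hl, Bool.false_eq_true, if_false]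
        rw [introLoop_acc _ ([] ++ [l])]
        simp only [List.nil_append, List.singleton_append]
        rw [rstrip_join_cons]
        have ihr := ih rest hrest
        cases hs : scanHead true rest 0 with
        | none =>
          rw [hs] at ihr
          rw [hscan, hs]
          simp only [Option.map_none]
          exact rstrip_glue l rest _ ihr
        | some j0 =>
          rw [hs] at ihr
          rw [hscan, hs]
          simp only [Option.map_some]
          have htake : (l ++ '\n' :: rest).take (j0 + (l.length + 1))
              = l ++ '\n' :: rest.take j0 := by
            rw [List.take_append]
            have h1 : l.take (j0 + (l.length + 1)) = l := List.take_of_length_le (by omega)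
            have h2 : j0 + (l.length + 1) - l.length = j0 + 1 := by omega
            rw [h1, h2]
            rfl
          rw [htake]
          exact rstrip_glue l _ _ ihr
      · rw [scan_true_none cs hh hmem, splitOn_no_nl cs hmem, introLoop]
        have hl : headingLine cs = false := hh
        simp only [hl, Bool.false_eq_true, if_false, introLoop, List.nil_append,
          PySem.Chars.join_singleton]

-- ===== VERDICT (by name: the statement is the Claim_ definition above) =====
theorem extract_intro_spec : Claim_equal_extract_intro := by
  intro markdown _
  unfold Spec_extract_intro extract_intro extract_intro_alt
  dsimp only
  have key := main_rstrip markdown.toList.length markdown.toList (Nat.le_refl _)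
  cases hs : scanHead true markdown.toList 0 with
  | none =>
    rw [hs] at key
    exact congrArg String.ofList (strip_eq_of_rstrip_eq key).symm
  | some j =>
    rw [hs] at key
    exact congrArg String.ofList (strip_eq_of_rstrip_eq key).symm
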